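-- pv_equiv track=rewrite | github.com/Ali1858/crs-rlhf | training_datasets/rm_dataset.py | _split_dialogue
-- ===== SOURCE A (Python) =====
-- def _split_dialogue(text):
--     lines = text.split("\n\n")
--
--     dialogue = []
--
--     # go over messages and combine consecutive messages from the
--     # same speaker (OA v1 expects alternating roles)
--     role = None
--     messages = []
--     for line in lines:
--         if line.startswith("Human:"):
--             speaker = "Human"
--             message = line[7:]
--         elif line.startswith("Assistant:"):
--             speaker = "Assistant"
--             message = line[11:]
--         else:
--             continue
--         if role != speaker:
--             if role is not None:
--                 dialogue.append((role, "\n".join(messages)))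
--                 messages = []
--             role = speaker
--         messages.append(message.strip())
--
--     if role is not None and len(messages) > 0:
--         dialogue.append((role, "\n".join(messages)))
--
--     return dialogue
-- ===== SOURCE B (Python) =====
-- def _split_dialogue(text):
--     # pass 1: classify lines into (speaker, stripped message) pairs
--     pairs = []
--     for line in text.split("\n\n"):
--         if line.startswith("Human:"):
--             pairs.append(("Human", line[7:].strip()))
--         elif line.startswith("Assistant:"):
--             pairs.append(("Assistant", line[11:].strip()))
--     # pass 2: merge consecutive runs of the same speaker
--     out = []
--     i = 0
--     n = len(pairs)
--     while i < n:
--         speaker = pairs[i][0]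
--         j = i
--         while j < n and pairs[j][0] == speaker:
--             j += 1
--         out.append((speaker, "\n".join(m for _, m in pairs[i:j])))
--         i = j
--     return out
-- ===== Notes on version B (the rewrite author's own statement) =====
-- stated objective: alternative
-- what changed: Replaces A's single stateful loop with role/messages accumulators by a two-pass pipeline: first classify lines into (speaker, stripped message) pairs, then merge consecutive same-speaker runs with an index scan.
import Mathlib
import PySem

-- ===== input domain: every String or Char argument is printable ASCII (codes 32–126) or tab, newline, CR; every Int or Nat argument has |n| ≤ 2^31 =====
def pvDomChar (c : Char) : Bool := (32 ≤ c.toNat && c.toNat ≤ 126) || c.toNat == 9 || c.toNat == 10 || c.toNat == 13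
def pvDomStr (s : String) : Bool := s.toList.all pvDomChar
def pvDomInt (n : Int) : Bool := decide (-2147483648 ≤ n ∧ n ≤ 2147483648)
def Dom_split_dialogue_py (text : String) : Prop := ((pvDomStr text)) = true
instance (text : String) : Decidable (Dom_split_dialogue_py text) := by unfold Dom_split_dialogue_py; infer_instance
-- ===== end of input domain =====

-- B replaces A's stateful role/messages accumulator with a classify-then-group-consecutive pipeline (objective: alternative decomposition, same cost).

-- ===== PORT A =====
-- A's loop body on the state (dialogue, role, messages); text.split("\n\n") is split? with a nonempty literal separator, so getD [] never fires.
def pvStepA (st : List (String × String) × Option String × List String) (line : String) :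
    List (String × String) × Option String × List String :=
  let (dialogue, role, messages) := st
  if PySem.Str.startswith line "Human:" then
    let message := PySem.Str.slice line (some 7) none
    if role = some "Human" then (dialogue, role, messages ++ [PySem.Str.strip message])
    else
      match role with
      | some r => (dialogue ++ [(r, PySem.Str.join "\n" messages)], some "Human", [PySem.Str.strip message])
      | none => (dialogue, some "Human", messages ++ [PySem.Str.strip message])
  else if PySem.Str.startswith line "Assistant:" then
    let message := PySem.Str.slice line (some 11) none
    if role = some "Assistant" then (dialogue, role, messages ++ [PySem.Str.strip message])
    else
      match role with
      | some r => (dialogue ++ [(r, PySem.Str.join "\n" messages)], some "Assistant", [PySem.Str.strip message])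
      | none => (dialogue, some "Assistant", messages ++ [PySem.Str.strip message])
  else st

def split_dialogue_py (text : String) : List (String × String) :=
  let lines := (PySem.Str.split? text "\n\n").getD []
  match lines.foldl pvStepA ([], none, []) with
  | (dialogue, some r, messages) =>
      if messages.length > 0 then dialogue ++ [(r, PySem.Str.join "\n" messages)] else dialogue
  | (dialogue, none, _) => dialogue

-- ===== PORT B =====
-- pass 1: classify each line into an optional (speaker, stripped message) pair
def pvClassify (line : String) : Option (String × String) :=
  if PySem.Str.startswith line "Human:" then
    some ("Human", PySem.Str.strip (PySem.Str.slice line (some 7) none))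
  else if PySem.Str.startswith line "Assistant:" then
    some ("Assistant", PySem.Str.strip (PySem.Str.slice line (some 11) none))
  else none

def pvStepB (acc : List (String × String)) (line : String) : List (String × String) :=
  match pvClassify line with
  | some p => acc ++ [p]
  | none => acc

-- pass 2: merge consecutive runs of the same speaker (Source B's j-scan as takeWhile/dropWhile)
def pvGroupRuns : List (String × String) → List (String × String)
  | [] => []
  | (s, m) :: rest =>
      (s, PySem.Str.join "\n" (m :: (rest.takeWhile (fun p => p.1 == s)).map (·.2))) ::
        pvGroupRuns (rest.dropWhile (fun p => p.1 == s))
termination_by l => l.length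
decreasing_by
  simpa using Nat.lt_succ_of_le (List.length_dropWhile_le _ _)

def split_dialogue_py_alt (text : String) : List (String × String) :=
  let pairs := ((PySem.Str.split? text "\n\n").getD []).foldl pvStepB []
  pvGroupRuns pairs

-- ===== PRECONDITION & SPEC =====
def Spec_split_dialogue_py (text : String) (out : List (String × String)) : Prop := out = split_dialogue_py_alt text
instance (text : String) (out : List (String × String)) : Decidable (Spec_split_dialogue_py text out) := by unfold Spec_split_dialogue_py; infer_instance

-- ===== CLAIM (what is proved, stated in full; the proofs are below) =====
def Claim_equal_split_dialogue_py : Prop := ∀ (text : String), Dom_split_dialogue_py text → Spec_split_dialogue_py text (split_dialogue_py text)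

-- ===== LEMMAS AND PROOFS =====

-- the clean step over classified pairs (proof device)
def pvStep' (st : List (String × String) × Option String × List String) (p : String × String) :
    List (String × String) × Option String × List String :=
  let (dialogue, role, messages) := st
  if role = some p.1 then (dialogue, role, messages ++ [p.2])
  else
    match role with
    | some r => (dialogue ++ [(r, PySem.Str.join "\n" messages)], some p.1, [p.2])
    | none => (dialogue, some p.1, messages ++ [p.2])

def pvFinalize (st : List (String × String) × Option String × List String) : List (String × String) :=
  match st with
  | (dialogue, some r, messages) =>
      if messages.length > 0 then dialogue ++ [(r, PySem.Str.join "\n" messages)] else dialogue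
  | (dialogue, none, _) => dialogue

lemma groupRuns_nil : pvGroupRuns [] = [] := by rw [pvGroupRuns]

lemma groupRuns_cons (s m : String) (rest : List (String × String)) :
    pvGroupRuns ((s, m) :: rest) =
      (s, PySem.Str.join "\n" (m :: (rest.takeWhile (fun p => p.1 == s)).map (·.2))) ::
        pvGroupRuns (rest.dropWhile (fun p => p.1 == s)) := by
  rw [pvGroupRuns]

-- A's step, expressed through the classification
lemma stepA_classify (st : List (String × String) × Option String × List String) (line : String) :
    pvStepA st line =
      match pvClassify line with
      | none => st
      | some p => pvStep' st p := by
  obtain ⟨d, r, ms⟩ := st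
  simp only [pvStepA, pvClassify]
  split_ifs <;> simp [pvStep', *]

lemma foldA_eq_fold' (lines : List String)
    (st : List (String × String) × Option String × List String) :
    lines.foldl pvStepA st = (lines.filterMap pvClassify).foldl pvStep' st := by
  induction lines generalizing st with
  | nil => rfl
  | cons l ls ih =>
      simp only [List.foldl_cons, List.filterMap_cons, stepA_classify]
      cases h : pvClassify l with
      | none => simp [ih]
      | some p => simp [List.foldl_cons, ih]

lemma foldB_eq_filterMap (lines : List String) (acc : List (String × String)) :
    lines.foldl pvStepB acc = acc ++ lines.filterMap pvClassify := by
  induction lines generalizing acc with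
  | nil => simp
  | cons l ls ih =>
      simp only [List.foldl_cons, List.filterMap_cons, pvStepB]
      cases h : pvClassify l with
      | none => simp [ih]
      | some p => simp [ih]

lemma fold'_run (ps : List (String × String)) (dial : List (String × String)) (r : String)
    (msgs : List String) (hm : msgs ≠ []) :
    pvFinalize (ps.foldl pvStep' (dial, some r, msgs)) =
      dial ++ (r, PySem.Str.join "\n" (msgs ++ (ps.takeWhile (fun p => p.1 == r)).map (·.2))) ::
        pvGroupRuns (ps.dropWhile (fun p => p.1 == r)) := by
  induction ps generalizing dial r msgs with
  | nil =>
      simp [pvFinalize, List.length_pos_iff, hm, groupRuns_nil]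
  | cons p ps ih =>
      obtain ⟨s, m⟩ := p
      by_cases hs : s = r
      · subst hs
        have hstep : pvStep' (dial, some s, msgs) (s, m) = (dial, some s, msgs ++ [m]) := by
          simp [pvStep']
        rw [List.foldl_cons, hstep, ih dial s (msgs ++ [m]) (by simp)]
        simp
      · have hstep : pvStep' (dial, some r, msgs) (s, m) =
            (dial ++ [(r, PySem.Str.join "\n" msgs)], some s, [m]) := by
          simp [pvStep']
          exact fun h => hs h.symm
        rw [List.foldl_cons, hstep,
          ih (dial ++ [(r, PySem.Str.join "\n" msgs)]) s [m] (by simp)]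
        have hb : ((s, m).1 == r) = false := by simpa using hs
        simp [hb, groupRuns_cons]

lemma finalize_fold'_eq_group (ps : List (String × String)) :
    pvFinalize (ps.foldl pvStep' ([], none, [])) = pvGroupRuns ps := by
  cases ps with
  | nil => simp [pvFinalize, groupRuns_nil]
  | cons p ps =>
      obtain ⟨s, m⟩ := p
      have hstep : pvStep' ([], none, []) (s, m) = ([], some s, [m]) := by
        simp [pvStep']
      rw [List.foldl_cons, hstep, fold'_run ps [] s [m] (by simp)]
      simp [groupRuns_cons]

-- ===== VERDICT (by name: the statement is the Claim_ definition above) =====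
theorem split_dialogue_py_spec : Claim_equal_split_dialogue_py := by
  intro text _
  show split_dialogue_py text = split_dialogue_py_alt text
  simp only [split_dialogue_py, split_dialogue_py_alt]
  rw [foldA_eq_fold', foldB_eq_filterMap, List.nil_append]
  simpa [pvFinalize] using
    finalize_fold'_eq_group (((PySem.Str.split? text "\n\n").getD []).filterMap pvClassify)
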